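-- pv_equiv track=rewrite | github.com/charouzic/algoexpert | numberOfRelocations.py | solution
-- ===== SOURCE A (Python) =====
-- def solution(A):
--     # write your code in Python 3.6
--     # traverse throught the array and have the current sum .... every iteration check if the sum is negative or positive
--     # if it is negative, add 1 to the shifts as we need to move the number to the end of the array
--     minMaxSum = 0
--     negatives = []
--     currSum = 0
--     relocations = 0
--
--     for number in A:
--         currSum += number
--         if currSum < 0:
--             minMaxSum = min(minMaxSum, currSum)
--         if number < 0:
--             negatives.append(number)
--
--     negatives.sort()
--
--     while minMaxSum < 0:
--         minMaxSum -= negatives.pop(0)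
--         relocations += 1
--
--
--     return relocations
-- ===== SOURCE B (Python) =====
-- def solution(A):
--     # one pass for the minimum prefix sum, then greedily cover the deficit
--     # with the largest-magnitude negatives (sorted once, scanned by index).
--     m = 0
--     s = 0
--     for x in A:
--         s += x
--         if s < m:
--             m = s
--     need = -m
--     negs = sorted(x for x in A if x < 0)
--     k = 0
--     acc = 0
--     for x in negs:
--         if acc >= need:
--             break
--         acc += -x
--         k += 1
--     return k
-- ===== Notes on version B (the rewrite author's own statement) =====
-- stated objective: alternative
-- what changed: B computes the minimum prefix sum in one pass and then scans the sorted negatives by index, accumulating absolute values until the deficit is covered, instead of A's while-loop that repeatedly pop(0)s from the sorted list.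
import Mathlib
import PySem

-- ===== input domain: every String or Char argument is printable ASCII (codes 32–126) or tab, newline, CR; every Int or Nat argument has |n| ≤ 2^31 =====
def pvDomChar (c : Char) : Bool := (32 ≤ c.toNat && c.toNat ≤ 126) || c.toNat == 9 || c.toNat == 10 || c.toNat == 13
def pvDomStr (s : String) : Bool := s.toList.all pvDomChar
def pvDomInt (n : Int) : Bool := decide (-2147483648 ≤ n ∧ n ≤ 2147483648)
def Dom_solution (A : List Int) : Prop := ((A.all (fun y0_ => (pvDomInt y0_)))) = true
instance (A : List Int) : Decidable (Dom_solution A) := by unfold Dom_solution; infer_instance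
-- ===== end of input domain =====

-- ===== PORT A =====
-- B replaces A's pop(0) while-loop by an indexed scan of the sorted negatives (alternative decomposition).
-- step of A's single for-loop: state = (minMaxSum, negatives, currSum)
def stepA (st : Int × List Int × Int) (x : Int) : Int × List Int × Int :=
  let s := st.2.2 + x
  let m := if s < 0 then min st.1 s else st.1
  let ns := if x < 0 then st.2.1 ++ [x] else st.2.1
  (m, ns, s)

-- A's while-loop; Python would raise IndexError on an empty list with m < 0,
-- but that state is unreachable (the deficit never exceeds the sum of negatives).
def whileA (m r : Int) : List Int → Int
  | [] => r
  | x :: rest => if m < 0 then whileA (m - x) (r + 1) rest else r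

def solution (A : List Int) : Int :=
  let st := A.foldl stepA (0, [], 0)
  whileA st.1 0 (PySem.List.sorted st.2.1 (fun x => x) false)

-- ===== PORT B =====
-- step of B's min-prefix-sum pass: state = (m, s)
def stepB (st : Int × Int) (x : Int) : Int × Int :=
  let s := st.2 + x
  (if s < st.1 then s else st.1, s)

-- B's for-loop with break: accumulate -x until acc ≥ need
def countB (need acc k : Int) : List Int → Int
  | [] => k
  | x :: rest => if acc ≥ need then k else countB need (acc + (-x)) (k + 1) rest

def solution_alt (A : List Int) : Int :=
  let m := (A.foldl stepB (0, 0)).1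
  let need := -m
  let negs := PySem.List.sorted (A.filter (fun x => decide (x < 0))) (fun x => x) false
  countB need 0 0 negs

-- ===== PRECONDITION & SPEC =====
def Spec_solution (A : List Int) (out : Int) : Prop := out = solution_alt A
instance (A : List Int) (out : Int) : Decidable (Spec_solution A out) := by unfold Spec_solution; infer_instance

-- ===== CLAIM (what is proved, stated in full; the proofs are below) =====
def Claim_equal_solution : Prop := ∀ (A : List Int), Dom_solution A → Spec_solution A (solution A)

-- ===== LEMMAS AND PROOFS =====

-- the two loops agree under the change of state acc = m + need, r = k
lemma while_eq_count : ∀ (L : List Int) (need acc k : Int),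
    countB need acc k L = whileA (acc - need) k L := by
  intro L
  induction L with
  | nil => intro need acc k; rfl
  | cons x rest ih =>
      intro need acc k
      simp only [countB, whileA]
      by_cases h : acc ≥ need
      · rw [if_pos h, if_neg (by omega)]
      · rw [if_neg h, if_pos (by omega), ih]
        congr 1
        omega

-- A's fold equals B's fold plus the filtered negatives, as long as m ≤ 0
lemma fold_eq : ∀ (L : List Int) (m s : Int) (ns : List Int), m ≤ 0 →
    L.foldl stepA (m, ns, s)
      = ((L.foldl stepB (m, s)).1, ns ++ L.filter (fun x => decide (x < 0)),
         (L.foldl stepB (m, s)).2) := by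
  intro L
  induction L with
  | nil => intro m s ns _; simp
  | cons x rest ih =>
      intro m s ns hm
      simp only [List.foldl_cons, List.filter_cons]
      have hstep : stepA (m, ns, s) x
          = ((stepB (m, s) x).1, if x < 0 then ns ++ [x] else ns, (stepB (m, s) x).2) := by
        simp only [stepA, stepB]
        congr 1
        split_ifs with h1 h2 h2 <;> omega
      rw [hstep]
      have hm' : (stepB (m, s) x).1 ≤ 0 := by
        simp only [stepB]; split_ifs <;> omega
      rw [ih _ _ _ hm']
      by_cases hx : x < 0
      · simp [hx]
      · simp [hx]

-- ===== VERDICT (by name: the statement is the Claim_ definition above) =====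
theorem solution_spec : Claim_equal_solution := by
  intro A _
  unfold Spec_solution solution solution_alt
  rw [fold_eq A 0 0 [] (le_refl 0)]
  simp only [List.nil_append]
  rw [while_eq_count]
  congr 1
  omega
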